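-- pv_equiv track=rewrite | github.com/Quindecim413/R_Interpretator | R/BuiltIn.py | concat_vectors
-- ===== SOURCE A (Python) =====
-- def concat_vectors(v1, v2):
--     v1_len = len(v1)
--     v2_len = len(v2)
--
--     if v1_len > v2_len:
--         res = []
--         times = v1_len // v2_len
--         more = v1_len - v2_len*times
--         for i in range(times):
--             res.extend(v2)
--         res.extend(v2[:more])
--         ret = list(zip(v1, res))
--         return ret
--     else:
--         res = []
--         times = v2_len // v1_len
--         more = v2_len - v1_len*times
--         for i in range(times):
--             res.extend(v1)
--         res.extend(v1[:more])
--         ret = list(zip(res, v2))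
--         return ret
-- ===== SOURCE B (Python) =====
-- def concat_vectors(v1, v2):
--     n = max(len(v1), len(v2))
--     return [(v1[i % len(v1)], v2[i % len(v2)]) for i in range(n)]
-- ===== Notes on version B (the rewrite author's own statement) =====
-- stated objective: idiomatic
-- what changed: Replaces the branchy physical replication of the shorter vector (floor-division count, repeated extend, tail slice, then zip) with a single comprehension that indexes both vectors modulo their own lengths over range(max(len(v1), len(v2))).
import Mathlib
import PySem

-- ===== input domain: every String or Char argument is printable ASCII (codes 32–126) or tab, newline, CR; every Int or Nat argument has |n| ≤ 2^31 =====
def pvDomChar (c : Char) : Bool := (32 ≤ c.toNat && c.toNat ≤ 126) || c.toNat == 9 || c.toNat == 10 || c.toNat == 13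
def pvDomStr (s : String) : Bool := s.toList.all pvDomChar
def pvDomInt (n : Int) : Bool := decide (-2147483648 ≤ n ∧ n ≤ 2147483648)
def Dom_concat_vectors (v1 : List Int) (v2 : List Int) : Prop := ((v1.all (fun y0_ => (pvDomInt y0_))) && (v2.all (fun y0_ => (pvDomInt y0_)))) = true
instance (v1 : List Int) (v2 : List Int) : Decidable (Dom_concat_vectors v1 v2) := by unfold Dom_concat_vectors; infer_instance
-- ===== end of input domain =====

-- B replaces A's physical replication of the shorter vector (floordiv count, repeated
-- extend, tail slice, zip) with one comprehension indexing both vectors modulo their own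
-- lengths; objective: idiomatic. Equal return values whenever both vectors are nonempty.

-- ===== PORT A =====
def concat_vectors (v1 : List Int) (v2 : List Int) : List (Int × Int) :=
  let v1_len : Int := v1.length
  let v2_len : Int := v2.length
  if v1_len > v2_len then
    let times := PySem.Int.floordiv v1_len v2_len
    let more := v1_len - v2_len * times
    let res := (PySem.List.pyRange 0 times 1).foldl (fun r _ => r ++ v2) []
    let res := res ++ PySem.List.slice v2 none (some more)
    v1.zip res
  else
    let times := PySem.Int.floordiv v2_len v1_len
    let more := v2_len - v1_len * times
    let res := (PySem.List.pyRange 0 times 1).foldl (fun r _ => r ++ v1) []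
    let res := res ++ PySem.List.slice v1 none (some more)
    res.zip v2

-- ===== PORT B =====
-- v[i % len(v)] is in range whenever v ≠ [] (Pre_); pyGetD's default 0 is never used there.
def concat_vectors_alt (v1 : List Int) (v2 : List Int) : List (Int × Int) :=
  let l1 : Int := v1.length
  let l2 : Int := v2.length
  let n : Int := max l1 l2
  (PySem.List.pyRange 0 n 1).map (fun i =>
    (PySem.List.pyGetD v1 (PySem.Int.mod i l1) 0,
     PySem.List.pyGetD v2 (PySem.Int.mod i l2) 0))

-- ===== PRECONDITION & SPEC =====
-- A raises ZeroDivisionError whenever either vector is empty (division by its length).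
def Pre_concat_vectors (v1 : List Int) (v2 : List Int) : Prop := v1 ≠ [] ∧ v2 ≠ []
instance (v1 : List Int) (v2 : List Int) : Decidable (Pre_concat_vectors v1 v2) := by unfold Pre_concat_vectors; infer_instance
def pvWitness_concat_vectors : List Int × List Int := ([1, 2, 3], [10, 20])

def Spec_concat_vectors (v1 : List Int) (v2 : List Int) (out : List (Int × Int)) : Prop := out = concat_vectors_alt v1 v2
instance (v1 : List Int) (v2 : List Int) (out : List (Int × Int)) : Decidable (Spec_concat_vectors v1 v2 out) := by unfold Spec_concat_vectors; infer_instance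

-- ===== CLAIM (what is proved, stated in full; the proofs are below) =====
def Claim_equal_concat_vectors : Prop := ∀ (v1 : List Int) (v2 : List Int), Dom_concat_vectors v1 v2 → Pre_concat_vectors v1 v2 → Spec_concat_vectors v1 v2 (concat_vectors v1 v2)

-- ===== LEMMAS AND PROOFS =====

-- A's extend loop builds t copies of v.
lemma foldl_append_const {α β : Type} (v : List α) (xs : List β) (acc : List α) :
    xs.foldl (fun r _ => r ++ v) acc = acc ++ (List.replicate xs.length v).flatten := by
  induction xs generalizing acc with
  | nil => simp
  | cons x xs ih => simp [List.replicate_succ, ih, List.append_assoc]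

-- The recycled list indexes the source modulo its length.
lemma cyc_getElem? (v : List Int) (t m i : Nat) (hm : m ≤ v.length)
    (hi : i < t * v.length + m) :
    ((List.replicate t v).flatten ++ v.take m)[i]? = v[i % v.length]? := by
  induction t generalizing i with
  | zero =>
    have h1 : i < m := by omega
    have h2 : i < v.length := by omega
    rw [List.replicate_zero]
    simp [h1, Nat.mod_eq_of_lt h2]
  | succ t ih =>
    have hmul : (t + 1) * v.length = t * v.length + v.length := by ring
    rw [hmul] at hi
    rw [List.replicate_succ, List.flatten_cons, List.append_assoc]
    by_cases hc : i < v.length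
    · rw [List.getElem?_append_left hc, Nat.mod_eq_of_lt hc]
    · rw [List.getElem?_append_right (by omega)]
      rw [ih (i - v.length) (by omega)]
      conv_rhs => rw [Nat.mod_eq_sub_mod (show v.length ≤ i by omega)]

lemma zip_getElem?_of_lt {α β : Type} (l1 : List α) (l2 : List β) (i : Nat)
    (h1 : i < l1.length) (h2 : i < l2.length) :
    (l1.zip l2)[i]? = some (l1[i], l2[i]) := by
  have h : i < (l1.zip l2).length := by rw [List.length_zip]; omega
  rw [List.getElem?_eq_getElem h, List.getElem_zip]

lemma cyc_getElem (v : List Int) (t m i : Nat) (hm : m ≤ v.length)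
    (hi : i < t * v.length + m) (hL : 0 < v.length)
    (hlen : i < ((List.replicate t v).flatten ++ v.take m).length) :
    ((List.replicate t v).flatten ++ v.take m)[i] = v[i % v.length]'(Nat.mod_lt i hL) := by
  have h := cyc_getElem? v t m i hm hi
  rw [List.getElem?_eq_getElem hlen, List.getElem?_eq_getElem (Nat.mod_lt i hL)] at h
  exact Option.some.inj h

-- B's comprehension, elementwise: the i-th entry pairs v1[i % len v1] with v2[i % len v2].
lemma alt_getElem? (v1 v2 : List Int) (h1 : 0 < v1.length) (h2 : 0 < v2.length)
    (i : Nat) (hi : i < max v1.length v2.length) :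
    (concat_vectors_alt v1 v2)[i]? =
      some (v1[i % v1.length]'(Nat.mod_lt i h1), v2[i % v2.length]'(Nat.mod_lt i h2)) := by
  unfold concat_vectors_alt
  simp only
  rw [← Nat.cast_max]
  rw [PySem.List.getElem?_map_pyRange_zero _ _ _ hi]
  rw [PySem.Int.mod_natCast, PySem.Int.mod_natCast,
      PySem.List.pyGetD_natCast, PySem.List.pyGetD_natCast]
  rw [List.getD_eq_getElem _ _ (Nat.mod_lt i h1), List.getD_eq_getElem _ _ (Nat.mod_lt i h2)]

lemma alt_length (v1 v2 : List Int) :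
    (concat_vectors_alt v1 v2).length = max v1.length v2.length := by
  unfold concat_vectors_alt
  simp only [List.length_map, PySem.List.length_pyRange_one]
  omega

lemma cyc_length (v : List Int) (t m : Nat) (hm : m ≤ v.length) :
    ((List.replicate t v).flatten ++ v.take m).length = t * v.length + m := by
  simp [List.length_flatten, List.map_replicate, List.sum_replicate, smul_eq_mul]
  omega

theorem concat_vectors_spec : Claim_equal_concat_vectors := by
  intro v1 v2 _ hpre
  obtain ⟨h1, h2⟩ := hpre
  have hL1 : 0 < v1.length := List.length_pos_of_ne_nil h1
  have hL2 : 0 < v2.length := List.length_pos_of_ne_nil h2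
  unfold Spec_concat_vectors concat_vectors
  simp only
  by_cases hgt : (v1.length : Int) > (v2.length : Int)
  · -- v1 longer: recycle v2
    rw [if_pos hgt]
    have hlt : v2.length < v1.length := by exact_mod_cast hgt
    rw [PySem.Int.floordiv_natCast]
    rw [show (v1.length : Int) - (v2.length : Int) * ((v1.length / v2.length : Nat) : Int)
          = ((v1.length % v2.length : Nat) : Int) by
        have h : ((v2.length : Int)) * ((v1.length / v2.length : Nat) : Int)
            + ((v1.length % v2.length : Nat) : Int) = (v1.length : Int) := by
          exact_mod_cast Nat.div_add_mod v1.length v2.length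
        linarith]
    rw [PySem.List.slice_to_natCast, foldl_append_const, List.nil_append,
        PySem.List.length_pyRange_one]
    rw [show ((((v1.length / v2.length : Nat) : Int)) - 0).toNat = v1.length / v2.length by
      rw [sub_zero, Int.toNat_natCast]]
    have hdm : (v1.length / v2.length) * v2.length + v1.length % v2.length = v1.length :=
      Nat.div_add_mod' v1.length v2.length
    have hm : v1.length % v2.length ≤ v2.length := (Nat.mod_lt _ hL2).le
    have hclen := cyc_length v2 (v1.length / v2.length) (v1.length % v2.length) hm
    apply List.ext_getElem?
    intro i
    by_cases hi : i < v1.length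
    · rw [zip_getElem?_of_lt _ _ i hi (by omega)]
      rw [alt_getElem? v1 v2 hL1 hL2 i (by omega)]
      rw [cyc_getElem v2 _ _ i hm (by omega) hL2 (by omega)]
      congr 1
      ext <;> simp [Nat.mod_eq_of_lt hi]
    · rw [List.getElem?_eq_none (by rw [List.length_zip]; omega),
          List.getElem?_eq_none (by rw [alt_length]; omega)]
  · -- v2 at least as long: recycle v1
    rw [if_neg hgt]
    have hle : v1.length ≤ v2.length := by
      have : ¬ (v2.length : Int) < (v1.length : Int) := hgt
      exact_mod_cast not_lt.mp this
    rw [PySem.Int.floordiv_natCast]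
    rw [show (v2.length : Int) - (v1.length : Int) * ((v2.length / v1.length : Nat) : Int)
          = ((v2.length % v1.length : Nat) : Int) by
        have h : ((v1.length : Int)) * ((v2.length / v1.length : Nat) : Int)
            + ((v2.length % v1.length : Nat) : Int) = (v2.length : Int) := by
          exact_mod_cast Nat.div_add_mod v2.length v1.length
        linarith]
    rw [PySem.List.slice_to_natCast, foldl_append_const, List.nil_append,
        PySem.List.length_pyRange_one]
    rw [show ((((v2.length / v1.length : Nat) : Int)) - 0).toNat = v2.length / v1.length by
      rw [sub_zero, Int.toNat_natCast]]
    have hdm : (v2.length / v1.length) * v1.length + v2.length % v1.length = v2.length :=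
      Nat.div_add_mod' v2.length v1.length
    have hm : v2.length % v1.length ≤ v1.length := (Nat.mod_lt _ hL1).le
    have hclen := cyc_length v1 (v2.length / v1.length) (v2.length % v1.length) hm
    apply List.ext_getElem?
    intro i
    by_cases hi : i < v2.length
    · rw [zip_getElem?_of_lt _ _ i (by omega) hi]
      rw [alt_getElem? v1 v2 hL1 hL2 i (by omega)]
      rw [cyc_getElem v1 _ _ i hm (by omega) hL1 (by omega)]
      congr 1
      ext <;> simp [Nat.mod_eq_of_lt hi]
    · rw [List.getElem?_eq_none (by rw [List.length_zip]; omega),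
          List.getElem?_eq_none (by rw [alt_length]; omega)]
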